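-- pv_equiv track=rewrite | github.com/eliottcassidy2000/math | 04-computation/f_poly_catalan_connection.py | gamma_expansion
-- ===== SOURCE A (Python) =====
-- import math
--
-- def gamma_expansion(F):
--     """Compute gamma coefficients of palindromic polynomial F.
--     F(x) = sum gamma_i * x^i * (1+x)^{d-2i} where d = deg(F).
--     """
--     d = len(F) - 1  # degree
--     gamma = [0] * (d // 2 + 1)
--
--     # Work from lowest gamma upward
--     # gamma_0 * (1+x)^d + gamma_1 * x * (1+x)^{d-2} + ...
--     remaining = list(F)
--
--     for i in range(d // 2 + 1):
--         # gamma_i contributes to coefficients i through d-i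
--         # via x^i * (1+x)^{d-2i}
--         # The coefficient of x^i in the expansion gives gamma_i = remaining[i]
--         # after subtracting previous gamma contributions.
--         gamma[i] = remaining[i]
--
--         # Subtract gamma_i * x^i * (1+x)^{d-2i} from remaining
--         deg_binom = d - 2*i
--         for j in range(deg_binom + 1):
--             remaining[i + j] -= gamma[i] * math.comb(deg_binom, j)
--
--     return gamma
-- ===== SOURCE B (Python) =====
-- import math
--
-- def gamma_expansion(F):
--     """Gamma coefficients of palindromic F by forward substitution on the
--     triangular system f_i = sum_{j<=i} gamma_j*C(d-2j, i-j): each gamma_i is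
--     computed directly from F[i] and the previous gammas; no working copy of F
--     is kept or mutated and no coefficients beyond index d//2 are ever touched."""
--     d = len(F) - 1
--     gamma = []
--     for i in range(d // 2 + 1):
--         g = F[i]
--         for j, gj in enumerate(gamma):
--             g -= gj * math.comb(d - 2 * j, i - j)
--         gamma.append(g)
--     return gamma
-- ===== Notes on version B (the rewrite author's own statement) =====
-- stated objective: faster
-- what changed: B solves the triangular system f_i = sum_{j<=i} gamma_j*C(d-2j,i-j) by forward substitution — each gamma_i comes from F[i] minus a dot product with the previously computed gammas — instead of A's Gaussian-elimination sweep that mutates a full working copy of F by subtracting each basis polynomial's entire coefficient row.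
import Mathlib
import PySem

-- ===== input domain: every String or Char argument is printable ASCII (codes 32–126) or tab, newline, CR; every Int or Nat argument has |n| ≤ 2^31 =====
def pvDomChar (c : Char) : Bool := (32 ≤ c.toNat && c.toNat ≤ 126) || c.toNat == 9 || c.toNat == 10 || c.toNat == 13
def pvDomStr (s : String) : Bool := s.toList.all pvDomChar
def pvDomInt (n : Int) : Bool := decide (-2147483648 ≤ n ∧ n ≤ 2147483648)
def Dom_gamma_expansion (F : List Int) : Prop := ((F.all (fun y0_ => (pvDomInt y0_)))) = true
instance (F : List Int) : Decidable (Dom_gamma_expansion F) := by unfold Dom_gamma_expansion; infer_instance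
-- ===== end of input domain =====

-- B solves the triangular system by forward substitution (gamma_i from F[i] and the
-- previous gammas) instead of A's elimination sweep mutating a working copy of F;
-- a timing run measured B faster (constant factor: fewer, smaller binomials).

-- ===== PORT A =====
-- math.comb(n, k) for the nonnegative arguments A passes it
def combA (n k : Nat) : Int := (n.choose k : Int)

-- inner loop: for j in range(e+1): remaining[i+j] -= g * math.comb(e, j)
-- (indices i+j are always in range in A, so List.set/getD are exact here)
def subRowA (g : Int) (e i : Nat) : Nat → Nat → List Int → List Int
  | _, 0, r => r
  | j, steps+1, r => subRowA g e i (j+1) steps (r.set (i+j) (r.getD (i+j) 0 - g * combA e j))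

-- outer loop: for i in range(d//2+1); state = (gamma, remaining)
-- deg_binom = d - 2*i is ≥ 0 for every i the loop reaches, so .toNat is exact
def outerA (d : Int) : Nat → Nat → List Int × List Int → List Int × List Int
  | _, 0, st => st
  | i, steps+1, st =>
    let g := st.2.getD i 0
    let e := (d - 2 * (i : Int)).toNat
    outerA d (i+1) steps (st.1.set i g, subRowA g e i 0 (e+1) st.2)

def gamma_expansion (F : List Int) : List Int :=
  let d : Int := (F.length : Int) - 1
  let n : Nat := (PySem.Int.floordiv d 2 + 1).toNat
  (outerA d 0 n (List.replicate n 0, F)).1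

-- ===== PORT B =====
-- inner loop of B: for j, gj in enumerate(gamma): g -= gj * math.comb(d-2j, i-j)
-- (d - 2j ≥ 0 for every j the loop reaches, so .toNat is exact)
def innerB (d : Int) (i : Nat) : List Int → Nat → Int → Int
  | [], _, g => g
  | gj :: rest, j, g => innerB d i rest (j+1) (g - gj * combA ((d - 2 * (j : Int)).toNat) (i - j))

-- outer loop of B: gamma grows by append
def outerB (F : List Int) (d : Int) : Nat → Nat → List Int → List Int
  | _, 0, gs => gs
  | i, steps+1, gs => outerB F d (i+1) steps (gs ++ [innerB d i gs 0 (F.getD i 0)])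

def gamma_expansion_alt (F : List Int) : List Int :=
  let d : Int := (F.length : Int) - 1
  let n : Nat := (PySem.Int.floordiv d 2 + 1).toNat
  outerB F d 0 n []

-- ===== PRECONDITION & SPEC =====
def Spec_gamma_expansion (F : List Int) (out : List Int) : Prop := out = gamma_expansion_alt F
instance (F : List Int) (out : List Int) : Decidable (Spec_gamma_expansion F out) := by unfold Spec_gamma_expansion; infer_instance

-- ===== CLAIM (what is proved, stated in full; the proofs are below) =====
def Claim_equal_gamma_expansion : Prop := ∀ (F : List Int), Dom_gamma_expansion F → Spec_gamma_expansion F (gamma_expansion F)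

-- ===== LEMMAS AND PROOFS =====

-- the dot product B's inner loop subtracts, written as a plain sum
def dotAux (d : Int) (m : Nat) : List Int → Nat → Int
  | [], _ => 0
  | gj :: rest, j => gj * combA ((d - 2 * (j : Int)).toNat) (m - j) + dotAux d m rest (j+1)

theorem innerB_eq (d : Int) (m : Nat) :
    ∀ gs j g, innerB d m gs j g = g - dotAux d m gs j := by
  intro gs
  induction gs with
  | nil => intro j g; simp [innerB, dotAux]
  | cons gj rest ih => intro j g; simp [innerB, dotAux, ih]; ring

theorem dotAux_append (d : Int) (m : Nat) (g : Int) :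
    ∀ gs j, dotAux d m (gs ++ [g]) j
      = dotAux d m gs j + g * combA ((d - 2 * ((j + gs.length : Nat) : Int)).toNat) (m - (j + gs.length)) := by
  intro gs
  induction gs with
  | nil => intro j; simp [dotAux]
  | cons gj rest ih =>
    intro j
    simp only [List.cons_append, dotAux, List.length_cons, ih (j+1)]
    have : j + 1 + rest.length = j + (rest.length + 1) := by omega
    rw [this]; ring

theorem subRowA_length (g : Int) (e i : Nat) :
    ∀ steps j r, (subRowA g e i j steps r).length = r.length := by
  intro steps
  induction steps with
  | zero => intro j r; rfl
  | succ s ih => intro j r; simp [subRowA, ih]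

-- pointwise effect of A's inner row subtraction
theorem subRowA_getD (g : Int) (e i : Nat) :
    ∀ steps j r m, m < r.length →
      (subRowA g e i j steps r).getD m 0
        = if i + j ≤ m ∧ m < i + j + steps then r.getD m 0 - g * combA e (m - i) else r.getD m 0 := by
  intro steps
  induction steps with
  | zero => intro j r m _; simp [subRowA]
  | succ s ih =>
    intro j r m hm
    simp only [subRowA]
    rw [ih (j+1) _ m (by simpa using hm)]
    by_cases hij : i + j = m
    · have hset : (r.set (i+j) (r.getD (i+j) 0 - g * combA e j)).getD m 0
          = r.getD m 0 - g * combA e j := by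
        subst hij
        simp [List.getD, List.getElem?_set_self (by omega)]
      rw [if_neg (by omega), hset, if_pos (by omega)]
      have : j = m - i := by omega
      subst this; rfl
    · have hset : (r.set (i+j) (r.getD (i+j) 0 - g * combA e j)).getD m 0 = r.getD m 0 := by
        simp [List.getD, List.getElem?_set_ne hij]
      rw [hset]
      by_cases h1 : i + (j+1) ≤ m ∧ m < i + (j+1) + s
      · rw [if_pos h1, if_pos (by omega)]
      · rw [if_neg h1, if_neg (by omega)]

-- main invariant: A's sweep with gamma prefix gs and residual rem equals B's forward substitution
theorem outer_inv (F : List Int) (d : Int) :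
    ∀ steps i gs rem, gs.length = i → rem.length = F.length → i + steps ≤ F.length →
      (∀ m, i ≤ m → m < F.length → rem.getD m 0 = F.getD m 0 - dotAux d m gs 0) →
      (outerA d i steps (gs ++ List.replicate steps 0, rem)).1 = outerB F d i steps gs := by
  intro steps
  induction steps with
  | zero => intro i gs rem _ _ _ _; simp [outerA, outerB]
  | succ s ih =>
    intro i gs rem hlen hrlen hbound hinv
    simp only [outerA, outerB]
    have hiF : i < F.length := by omega
    have hg : rem.getD i 0 = innerB d i gs 0 (F.getD i 0) := by
      rw [innerB_eq, hinv i le_rfl hiF]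
    set g := innerB d i gs 0 (F.getD i 0) with hgdef
    set e := (d - 2 * (i : Int)).toNat with hedef
    have hset : (gs ++ List.replicate (s + 1) (0 : Int)).set i (rem.getD i 0)
        = (gs ++ [g]) ++ List.replicate s 0 := by
      rw [hg]
      subst hlen
      simp [List.replicate_succ]
    rw [hg] at hset
    rw [hg, hset]
    apply ih (i+1) (gs ++ [g]) _ (by simp [hlen]) (by rw [subRowA_length]; exact hrlen) (by omega)
    intro m him hmF
    have hmr : m < rem.length := by omega
    rw [subRowA_getD g e i (e+1) 0 rem m hmr]
    have hdot := dotAux_append d m g gs 0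
    rw [hlen] at hdot
    simp only [Nat.zero_add] at hdot
    by_cases hcase : m ≤ i + e
    · rw [if_pos (by omega), hinv m (by omega) hmF, hdot]
      ring
    · -- m - i > e, so the appended term's binomial is 0
      rw [if_neg (by omega), hinv m (by omega) hmF, hdot]
      have hz : combA e (m - i) = 0 := by
        simp [combA, Nat.choose_eq_zero_of_lt (by omega : e < m - i)]
      rw [← hedef, hz]
      ring

theorem n_le_len (F : List Int) :
    (PySem.Int.floordiv ((F.length : Int) - 1) 2 + 1).toNat ≤ F.length := by
  rw [PySem.Int.floordiv_eq_ediv_of_pos (by omega)]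
  omega

-- ===== VERDICT (by name: the statement is the Claim_ definition above) =====
theorem gamma_expansion_spec : Claim_equal_gamma_expansion := by
  intro F _
  unfold Spec_gamma_expansion gamma_expansion gamma_expansion_alt
  have h := outer_inv F ((F.length : Int) - 1)
    (PySem.Int.floordiv ((F.length : Int) - 1) 2 + 1).toNat 0 [] F rfl rfl
    (by simpa using n_le_len F) (by intro m _ _; simp [dotAux])
  simpa using h
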